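-- pv_equiv track=rewrite | github.com/huskobro/contenthub | backend/app/previews/classifier.py | _derive_preview_label
-- ===== SOURCE A (Python) =====
-- from typing import Optional
--
-- _PREVIEW_LABEL_MAP = {
--     "preview_mini": "Mini preview",
--     "preview_frame": "Frame preview",
--     "preview_script": "Script preview",
--     "preview_metadata": "Metadata preview",
--     "preview_subtitle": "Subtitle preview",
--     "preview_composition": "Composition preview",
--     "preview_thumbnail": "Thumbnail preview",
--     "preview_news_selected": "Selected items preview",
--     "preview_props": "Preview render props",
-- }
--
-- def _derive_preview_label(stem: str) -> Optional[str]: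
--     if stem in _PREVIEW_LABEL_MAP:
--         return _PREVIEW_LABEL_MAP[stem]
--     best: Optional[str] = None
--     best_len = 0
--     for prefix, lbl in _PREVIEW_LABEL_MAP.items():
--         if stem.startswith(prefix) and len(prefix) > best_len:
--             best = lbl
--             best_len = len(prefix)
--     return best
-- ===== SOURCE B (Python) =====
-- from typing import Optional
--
-- _PREVIEW_LABEL_MAP = {
--     "preview_mini": "Mini preview",
--     "preview_frame": "Frame preview",
--     "preview_script": "Script preview",
--     "preview_metadata": "Metadata preview",
--     "preview_subtitle": "Subtitle preview",
--     "preview_composition": "Composition preview",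
--     "preview_thumbnail": "Thumbnail preview",
--     "preview_news_selected": "Selected items preview",
--     "preview_props": "Preview render props",
-- }
--
-- _MAX_PREFIX_LEN = max(map(len, _PREVIEW_LABEL_MAP))
--
-- def _derive_preview_label(stem: str) -> Optional[str]:
--     for i in range(min(len(stem), _MAX_PREFIX_LEN), 0, -1):
--         p = stem[:i]
--         if p in _PREVIEW_LABEL_MAP:
--             return _PREVIEW_LABEL_MAP[p]
--     return None
-- ===== Notes on version B (the rewrite author's own statement) =====
-- stated objective: idiomatic
-- what changed: B iterates over the prefixes of stem from longest to shortest and returns on the first dict membership hit, instead of scanning the whole label map with startswith while tracking the best length; the exact-match guard is subsumed by the full-length prefix.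
import Mathlib
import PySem

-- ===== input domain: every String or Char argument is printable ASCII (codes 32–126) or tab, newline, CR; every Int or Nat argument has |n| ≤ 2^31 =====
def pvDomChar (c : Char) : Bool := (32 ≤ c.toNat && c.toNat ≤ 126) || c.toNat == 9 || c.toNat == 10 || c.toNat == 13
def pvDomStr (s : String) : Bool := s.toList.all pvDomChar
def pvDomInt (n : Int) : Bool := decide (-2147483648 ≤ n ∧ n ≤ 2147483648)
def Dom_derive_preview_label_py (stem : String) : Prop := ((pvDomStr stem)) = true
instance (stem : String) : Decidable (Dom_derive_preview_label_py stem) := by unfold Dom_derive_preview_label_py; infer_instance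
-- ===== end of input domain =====

-- B replaces A's scan of the label map with startswith by a longest-to-shortest scan of stem's own
-- prefixes with dict lookups (idiomatic longest-prefix match); return values are proved equal.

-- ===== PORT A =====
-- _PREVIEW_LABEL_MAP, as the insertion-ordered item list and the dict built from it
def pvItems : List (String × String) := [
  ("preview_mini", "Mini preview"),
  ("preview_frame", "Frame preview"),
  ("preview_script", "Script preview"),
  ("preview_metadata", "Metadata preview"),
  ("preview_subtitle", "Subtitle preview"),
  ("preview_composition", "Composition preview"),
  ("preview_thumbnail", "Thumbnail preview"),
  ("preview_news_selected", "Selected items preview"),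
  ("preview_props", "Preview render props")]

def pvMap : PySem.Dict String String := PySem.Dict.ofList pvItems

def derive_preview_label_py (stem : String) : Option String :=
  if pvMap.contains stem then pvMap.get? stem
  else
    (pvMap.items.foldl
      (fun (acc : Option String × Int) kv =>
        if PySem.Str.startswith stem kv.1 = true ∧ PySem.Str.len kv.1 > acc.2
        then (some kv.2, PySem.Str.len kv.1) else acc)
      ((none : Option String), (0 : Int))).1

-- ===== PORT B =====
-- the 'for i in range(len(stem), 0, -1)' loop with its early return
def pvLoopB (stem : String) : List Int → Option String
  | [] => none
  | i :: rest =>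
    let p := PySem.Str.slice stem (some 0) (some i)
    if pvMap.contains p then pvMap.get? p else pvLoopB stem rest

-- _MAX_PREFIX_LEN = max(map(len, _PREVIEW_LABEL_MAP)); the keys list is a nonempty literal,
-- so Python's max total here; .getD 0 only discharges the empty case max? leaves open
def pvMaxPrefixLen : Int := (PySem.List.max? (pvMap.keys.map PySem.Str.len) id).getD 0

def derive_preview_label_py_alt (stem : String) : Option String :=
  pvLoopB stem (PySem.List.pyRange (min (PySem.Str.len stem) pvMaxPrefixLen) 0 (-1))

-- ===== PRECONDITION & SPEC =====
def Spec_derive_preview_label_py (stem : String) (out : Option String) : Prop := out = derive_preview_label_py_alt stem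
instance (stem : String) (out : Option String) : Decidable (Spec_derive_preview_label_py stem out) := by unfold Spec_derive_preview_label_py; infer_instance

-- ===== CLAIM (what is proved, stated in full; the proofs are below) =====
def Claim_equal_derive_preview_label_py : Prop := ∀ (stem : String), Dom_derive_preview_label_py stem → Spec_derive_preview_label_py stem (derive_preview_label_py stem)

-- ===== LEMMAS AND PROOFS =====

-- the dict really is the literal item list
theorem pvMap_items : pvMap.items = pvItems := by decide

theorem pvMap_keys_nodup : pvMap.keys.Nodup := by decide

-- every key of the map is a nonempty string
theorem pv_key_pos : ∀ kv ∈ pvItems, 0 < kv.1.toList.length := by decide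

theorem pvMaxPrefixLen_eq : pvMaxPrefixLen = 21 := by decide

-- every key of the map has at most 21 characters
theorem pv_key_len_le : ∀ kv ∈ pvItems, kv.1.toList.length ≤ 21 := by decide

-- no key of the map is a proper prefix of another key
theorem pv_key_prefix_eq : ∀ kv1 ∈ pvItems, ∀ kv2 ∈ pvItems,
    kv1.1.toList <+: kv2.1.toList → kv1.1 = kv2.1 := by decide

-- at most one key can be a prefix of a given stem
theorem pv_excl (l : List Char) : ∀ kv1 ∈ pvItems, ∀ kv2 ∈ pvItems,
    kv1.1.toList <+: l → kv2.1.toList <+: l → kv1.1 = kv2.1 := by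
  intro kv1 h1 kv2 h2 hp1 hp2
  rcases List.prefix_or_prefix_of_prefix hp1 hp2 with h | h
  · exact pv_key_prefix_eq kv1 h1 kv2 h2 h
  · exact (pv_key_prefix_eq kv2 h2 kv1 h1 h).symm

-- stem[:i] as a list, for a natural i
theorem pv_slice_toList (stem : String) (i : Nat) :
    (PySem.Str.slice stem (some 0) (some (i : Int))).toList = stem.toList.take i := by
  rw [PySem.Str.toList_slice]
  show PySem.List.slice stem.toList (some 0) (some (i : Int)) = _
  rw [PySem.List.slice_zero_start, PySem.List.slice_to_natCast]

-- a successful lookup of stem[:i] exhibits a key that is a prefix of stem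
theorem pv_contains_slice (stem : String) (i : Nat)
    (h : pvMap.contains (PySem.Str.slice stem (some 0) (some (i : Int))) = true) :
    ∃ kv ∈ pvItems, kv.1.toList <+: stem.toList ∧
      kv.1 = PySem.Str.slice stem (some 0) (some (i : Int)) := by
  rw [PySem.Dict.contains_eq_isSome_get?] at h
  rcases Option.isSome_iff_exists.mp h with ⟨v, hv⟩
  have hm := PySem.Dict.mem_items_of_get?_eq_some pvMap hv
  rw [pvMap_items] at hm
  refine ⟨_, hm, ?_, rfl⟩
  rw [pv_slice_toList]
  exact List.take_prefix i stem.toList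

-- the loop returns none when no admissible slice is in the map
theorem pvLoopB_none (stem : String) (j : Nat)
    (h : ∀ i : Nat, 0 < i → i ≤ j →
      pvMap.contains (PySem.Str.slice stem (some 0) (some (i : Int))) = false) :
    pvLoopB stem (PySem.List.pyRange (j : Int) 0 (-1)) = none := by
  induction j with
  | zero => rw [PySem.List.pyRange_neg_one_eq_nil (by norm_num)]; rfl
  | succ j ih =>
    rw [PySem.List.pyRange_neg_one_cons (by exact_mod_cast Nat.succ_pos j)]
    have : ((j : Int) + 1) - 1 = (j : Int) := by ring
    simp only [pvLoopB, Nat.cast_succ, this]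
    have h' := h (j+1) (Nat.succ_pos j) le_rfl
    push_cast at h'
    rw [h']
    simp only [Bool.false_eq_true, if_false]
    exact ih (fun i hi hij => h i hi (Nat.le_succ_of_le hij))

-- the loop stops at the first (longest) slice that is in the map
theorem pvLoopB_find (stem : String) (m j : Nat) (hm : 0 < m) (hmj : m ≤ j)
    (hc : pvMap.contains (PySem.Str.slice stem (some 0) (some (m : Int))) = true)
    (h : ∀ i : Nat, m < i → i ≤ j →
      pvMap.contains (PySem.Str.slice stem (some 0) (some (i : Int))) = false) :
    pvLoopB stem (PySem.List.pyRange (j : Int) 0 (-1)) =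
      pvMap.get? (PySem.Str.slice stem (some 0) (some (m : Int))) := by
  induction j with
  | zero => omega
  | succ j ih =>
    rw [PySem.List.pyRange_neg_one_cons (by exact_mod_cast Nat.succ_pos j)]
    have he : ((j : Int) + 1) - 1 = (j : Int) := by ring
    simp only [pvLoopB, Nat.cast_succ, he]
    by_cases hjm : m = j + 1
    · subst hjm
      push_cast at hc ⊢
      rw [if_pos hc]
    · have hmle : m ≤ j := by omega
      have h' := h (j+1) (by omega) le_rfl
      push_cast at h'
      rw [h']
      simp only [Bool.false_eq_true, if_false]
      exact ih hmle (fun i hi hij => h i hi (Nat.le_succ_of_le hij))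

-- a fold step sequence over entries none of whose keys matches leaves the accumulator alone
theorem pv_fold_false (stem : String) (items' : List (String × String))
    (acc : Option String × Int)
    (h : ∀ kv ∈ items', PySem.Str.startswith stem kv.1 = false) :
    items'.foldl
      (fun (acc : Option String × Int) kv =>
        if PySem.Str.startswith stem kv.1 = true ∧ PySem.Str.len kv.1 > acc.2
        then (some kv.2, PySem.Str.len kv.1) else acc) acc = acc := by
  induction items' generalizing acc with
  | nil => rfl
  | cons kv rest ih =>
    simp only [List.foldl_cons]
    rw [if_neg (by rw [h kv (List.mem_cons_self)]; simp)]
    exact ih acc (fun kv' h' => h kv' (List.mem_cons_of_mem _ h'))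

-- ===== VERDICT (by name: the statement is the Claim_ definition above) =====
-- startswith, read as a prefix statement
theorem pv_startswith_iff (stem p : String) :
    PySem.Str.startswith stem p = true ↔ p.toList <+: stem.toList := by
  rw [PySem.Str.startswith_eq, PySem.Chars.startswith_iff]

-- a membership test on the dict exhibits an item pair
theorem pv_contains_mem (p : String) (h : pvMap.contains p = true) :
    ∃ v, (p, v) ∈ pvItems := by
  rw [PySem.Dict.contains_eq_isSome_get?] at h
  rcases Option.isSome_iff_exists.mp h with ⟨v, hv⟩
  exact ⟨v, pvMap_items ▸ PySem.Dict.mem_items_of_get?_eq_some pvMap hv⟩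

theorem derive_preview_label_py_spec : Claim_equal_derive_preview_label_py := by
  intro stem _
  unfold Spec_derive_preview_label_py derive_preview_label_py derive_preview_label_py_alt
  rw [PySem.Str.len_eq, pvMaxPrefixLen_eq,
    show ((21 : Int)) = ((21 : Nat) : Int) by norm_num, ← Nat.cast_min]
  by_cases hex : ∃ kv ∈ pvItems, kv.1.toList <+: stem.toList
  · -- some key is a prefix of stem (at most one can be)
    obtain ⟨⟨k, lbl⟩, hkv, hpre⟩ := hex
    have hm : 0 < k.toList.length := pv_key_pos _ hkv
    have hmn : k.toList.length ≤ stem.toList.length := hpre.length_le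
    have htake : stem.toList.take k.toList.length = k.toList :=
      (List.prefix_iff_eq_take.mp hpre).symm
    have hslice : PySem.Str.slice stem (some 0) (some (k.toList.length : Int)) = k :=
      String.toList_inj.mp (by rw [pv_slice_toList]; exact htake)
    have hget : pvMap.get? k = some lbl :=
      PySem.Dict.get?_of_mem_items pvMap (pvMap_items ▸ hkv) pvMap_keys_nodup
    have hc : pvMap.contains (PySem.Str.slice stem (some 0) (some (k.toList.length : Int))) = true := by
      rw [hslice, PySem.Dict.contains_eq_isSome_get?, hget]; rfl
    have hmn' : k.toList.length ≤ min stem.toList.length 21 :=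
      le_min hmn (pv_key_len_le _ hkv)
    have hnone : ∀ i : Nat, k.toList.length < i → i ≤ min stem.toList.length 21 →
        pvMap.contains (PySem.Str.slice stem (some 0) (some (i : Int))) = false := by
      intro i hmi hin'
      have hin : i ≤ stem.toList.length := le_trans hin' (min_le_left _ _)
      by_contra hcon
      have hct : pvMap.contains (PySem.Str.slice stem (some 0) (some (i : Int))) = true := by
        simpa using hcon
      rcases pv_contains_slice stem i hct with ⟨kv', hkv', hpre', heq⟩
      have hk' : kv'.1 = k := pv_excl stem.toList kv' hkv' (k, lbl) hkv hpre' hpre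
      have hlen : kv'.1.toList.length = i := by
        rw [heq, pv_slice_toList, List.length_take]
        omega
      rw [hk'] at hlen
      omega
    rw [pvLoopB_find stem k.toList.length (min stem.toList.length 21) hm hmn' hc hnone,
      hslice, hget]
    -- now the A side
    by_cases hcs : pvMap.contains stem = true
    · rw [if_pos hcs]
      rcases pv_contains_mem stem hcs with ⟨v, hv⟩
      have : stem = k := pv_excl stem.toList (stem, v) hv (k, lbl) hkv (List.prefix_refl _) hpre
      rw [this, hget]
    · rw [if_neg hcs, pvMap_items]
      obtain ⟨s, t, hst⟩ := List.append_of_mem hkv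
      have hnd : (s.map Prod.fst ++ k :: t.map Prod.fst).Nodup := by
        have h0 : (pvItems.map Prod.fst).Nodup := by decide
        rw [hst, List.map_append, List.map_cons] at h0
        exact h0
      obtain ⟨hnds, hndkt, hdisj⟩ := List.nodup_append.mp hnd
      have hks : k ∉ s.map Prod.fst := fun hk => hdisj k hk k (by simp) rfl
      have hkt : k ∉ t.map Prod.fst := (List.nodup_cons.mp hndkt).1
      have hfalse : ∀ kv' : String × String, kv' ∈ s ∨ kv' ∈ t →
          PySem.Str.startswith stem kv'.1 = false := by
        intro kv' hmem'
        by_contra hcon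
        have hsw : PySem.Str.startswith stem kv'.1 = true := by simpa using hcon
        have hpre' : kv'.1.toList <+: stem.toList := (pv_startswith_iff stem kv'.1).mp hsw
        have hmemI : kv' ∈ pvItems := by
          rw [hst]
          rcases hmem' with h' | h'
          · exact List.mem_append_left _ h'
          · exact List.mem_append_right _ (List.mem_cons_of_mem _ h')
        have hk' : kv'.1 = k := pv_excl stem.toList kv' hmemI (k, lbl) hkv hpre' hpre
        rcases hmem' with h' | h'
        · exact hks (by rw [← hk']; exact List.mem_map_of_mem h')
        · exact hkt (by rw [← hk']; exact List.mem_map_of_mem h')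
      rw [hst, List.foldl_append,
        pv_fold_false stem s _ (fun kv' h' => hfalse kv' (Or.inl h')), List.foldl_cons]
      rw [if_pos ⟨(pv_startswith_iff stem k).mpr hpre,
        by show PySem.Str.len k > (0 : Int); rw [PySem.Str.len_eq]; exact_mod_cast hm⟩]
      rw [pv_fold_false stem t _ (fun kv' h' => hfalse kv' (Or.inr h'))]
  · -- no key is a prefix of stem: both sides return none
    push Not at hex
    have hB : pvLoopB stem
        (PySem.List.pyRange ((min stem.toList.length 21 : Nat) : Int) 0 (-1)) = none := by
      apply pvLoopB_none
      intro i hi hij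
      by_contra hcon
      have hct : pvMap.contains (PySem.Str.slice stem (some 0) (some (i : Int))) = true := by
        simpa using hcon
      rcases pv_contains_slice stem i hct with ⟨kv, hkv, hpre, _⟩
      exact absurd hpre (hex kv hkv)
    rw [hB]
    have hcs : pvMap.contains stem ≠ true := by
      intro hcs
      rcases pv_contains_mem stem hcs with ⟨v, hv⟩
      exact absurd (List.prefix_refl _) (hex (stem, v) hv)
    rw [if_neg hcs, pvMap_items,
      pv_fold_false stem pvItems _ (fun kv hkv => by
        by_contra hcon
        have hsw : PySem.Str.startswith stem kv.1 = true := by simpa using hcon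
        exact absurd ((pv_startswith_iff stem kv.1).mp hsw) (hex kv hkv))]
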